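-- pv_equiv track=rewrite | github.com/jackgopack4/leetcode | 1794.py | countQuadruples
-- ===== SOURCE A (Python) =====
-- def countQuadruples(firstString: str, secondString: str) -> int:
--     second_dict = {}
--     for i,c in enumerate(secondString):
--         second_dict[c] = i
--     min_j_a = len(firstString)
--     count_min_j_a = 0
--     for j,c in enumerate(firstString):
--         if c not in second_dict:
--             continue
--         a = second_dict[c]
--         if j-a < min_j_a:
--             count_min_j_a = 1
--             min_j_a = j-a
--         elif j-a == min_j_a:
--             count_min_j_a += 1
--     return count_min_j_a
-- ===== SOURCE B (Python) =====
-- def countQuadruples(firstString: str, secondString: str) -> int: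
--     pos = {}
--     for i, c in enumerate(secondString):
--         pos[c] = i
--     diffs = [j - pos[c] for j, c in enumerate(firstString) if c in pos]
--     if not diffs:
--         return 0
--     m = min(diffs)
--     return diffs.count(m)
-- ===== Notes on version B (the rewrite author's own statement) =====
-- stated objective: simpler
-- what changed: Replaces the running-minimum-with-reset-counter loop state by materializing the list of all j-a differences once, then taking min and count in separate reduction passes.
import Mathlib
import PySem

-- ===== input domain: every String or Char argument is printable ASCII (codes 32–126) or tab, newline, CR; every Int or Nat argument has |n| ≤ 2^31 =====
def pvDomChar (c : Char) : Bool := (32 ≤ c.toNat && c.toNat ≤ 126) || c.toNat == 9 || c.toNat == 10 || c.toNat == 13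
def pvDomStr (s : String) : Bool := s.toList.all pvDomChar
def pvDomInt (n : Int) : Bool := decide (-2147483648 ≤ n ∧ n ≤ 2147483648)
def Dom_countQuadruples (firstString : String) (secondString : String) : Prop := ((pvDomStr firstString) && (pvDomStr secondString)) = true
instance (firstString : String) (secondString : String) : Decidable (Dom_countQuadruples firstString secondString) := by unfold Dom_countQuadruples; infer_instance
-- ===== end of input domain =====

-- B materializes the list of all j-a differences and then takes min and count in
-- separate passes, instead of A's single loop carrying a running minimum with a
-- reset counter (objective: simpler). Return values proved equal on all inputs.

-- ===== PORT A =====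
def countQuadruples (firstString : String) (secondString : String) : Int :=
  let secondDict : PySem.Dict Char Int :=
    (PySem.List.enumerate secondString.toList).foldl
      (fun d p => d.insert p.2 p.1) PySem.Dict.empty
  let st :=
    (PySem.List.enumerate firstString.toList).foldl
      (fun (st : Int × Int) p =>
        if secondDict.contains p.2 = false then st  -- 'if c not in second_dict: continue'
        else
          let a := secondDict.getD p.2 0            -- a = second_dict[c] (key present)
          if p.1 - a < st.1 then (p.1 - a, 1)
          else if p.1 - a = st.1 then (st.1, st.2 + 1)
          else st)
      ((PySem.Str.len firstString : Int), 0)        -- (min_j_a, count_min_j_a)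
  st.2

-- ===== PORT B =====
def countQuadruples_alt (firstString : String) (secondString : String) : Int :=
  let pos : PySem.Dict Char Int :=
    (PySem.List.enumerate secondString.toList).foldl
      (fun d p => d.insert p.2 p.1) PySem.Dict.empty
  let diffs : List Int :=
    (PySem.List.enumerate firstString.toList).filterMap
      (fun p => if pos.contains p.2 then some (p.1 - pos.getD p.2 0) else none)
  match PySem.List.min? diffs (fun x => x) with
  | none => 0
  | some m => (diffs.count m : Int)

-- ===== PRECONDITION & SPEC =====
def Spec_countQuadruples (firstString : String) (secondString : String) (out : Int) : Prop := out = countQuadruples_alt firstString secondString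
instance (firstString : String) (secondString : String) (out : Int) : Decidable (Spec_countQuadruples firstString secondString out) := by unfold Spec_countQuadruples; infer_instance

-- ===== CLAIM (what is proved, stated in full; the proofs are below) =====
def Claim_equal_countQuadruples : Prop := ∀ (firstString : String) (secondString : String), Dom_countQuadruples firstString secondString → Spec_countQuadruples firstString secondString (countQuadruples firstString secondString)

-- ===== LEMMAS AND PROOFS =====

-- foldl min never exceeds its seed
theorem pv_foldl_min_le_init (T : List Int) : ∀ x : Int, T.foldl min x ≤ x := by
  induction T with
  | nil => intro x; simp
  | cons a T ih =>
    intro x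
    calc T.foldl min (min x a) ≤ min x a := ih _
    _ ≤ x := min_le_left _ _

-- foldl min stays below a strict upper bound of seed and elements
theorem pv_foldl_min_lt (T : List Int) : ∀ (x c : Int), x < c → (∀ y ∈ T, y < c) → T.foldl min x < c := by
  induction T with
  | nil => intro x c hx _; simpa using hx
  | cons a T ih =>
    intro x c hx h
    exact ih _ _ (lt_of_le_of_lt (min_le_left _ _) hx) (fun y hy => h y (List.mem_cons_of_mem _ hy))

-- A's loop over the enumerated string, seen through the list of materialized diffs:
-- its state after the loop is the running minimum together with B's count/reset value.
theorem pv_loop_eq (pos : PySem.Dict Char Int) :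
    ∀ (L : List (Int × Char)) (m c : Int),
    L.foldl
      (fun (st : Int × Int) p =>
        if pos.contains p.2 = false then st
        else
          if p.1 - pos.getD p.2 0 < st.1 then (p.1 - pos.getD p.2 0, 1)
          else if p.1 - pos.getD p.2 0 = st.1 then (st.1, st.2 + 1)
          else st) (m, c) =
    ((L.filterMap (fun p => if pos.contains p.2 then some (p.1 - pos.getD p.2 0) else none)).foldl min m,
      if (L.filterMap (fun p => if pos.contains p.2 then some (p.1 - pos.getD p.2 0) else none)).foldl min m < m
      then ((L.filterMap (fun p => if pos.contains p.2 then some (p.1 - pos.getD p.2 0) else none)).count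
              ((L.filterMap (fun p => if pos.contains p.2 then some (p.1 - pos.getD p.2 0) else none)).foldl min m) : Int)
      else c + ((L.filterMap (fun p => if pos.contains p.2 then some (p.1 - pos.getD p.2 0) else none)).count m : Int)) := by
  intro L
  induction L with
  | nil => intro m c; simp
  | cons p t ih =>
    intro m c
    by_cases hc : pos.contains p.2 = false
    · simp only [List.foldl_cons, List.filterMap_cons, hc, Bool.false_eq_true, reduceIte]
      exact ih m c
    · have hct : pos.contains p.2 = true := by simpa using hc
      simp only [List.foldl_cons, List.filterMap_cons, hc, Bool.true_eq_false, reduceIte]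
      set x : Int := p.1 - pos.getD p.2 0 with hx
      set T : List Int := t.filterMap (fun p => if pos.contains p.2 = true then some (p.1 - pos.getD p.2 0) else none) with hT
      have hle := pv_foldl_min_le_init T
      by_cases h1 : x < m
      · rw [if_pos h1, ih x 1]
        simp only [List.foldl_cons, min_eq_right (le_of_lt h1)]
        refine Prod.ext ?_ ?_
        · rfl
        · by_cases h2 : T.foldl min x < x
          · rw [if_pos h2, if_pos (lt_trans h2 h1)]
            have hne : ¬ (T.foldl min x = x) := by omega
            simp [List.count_cons, hne, Ne.symm hne]
          · have heq : T.foldl min x = x := le_antisymm (hle x) (le_of_not_gt h2)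
            rw [if_neg h2, if_pos (show T.foldl min x < m by omega)]
            simp [List.count_cons, heq]
            omega
      · rw [if_neg h1]
        by_cases h2 : x = m
        · rw [if_pos h2, ih m (c + 1)]
          simp only [List.foldl_cons, min_eq_left (le_of_not_gt h1)]
          refine Prod.ext ?_ ?_
          · rfl
          · by_cases h3 : T.foldl min m < m
            · rw [if_pos h3, if_pos h3]
              have hne : ¬ (T.foldl min m = x) := by omega
              simp [List.count_cons, hne, Ne.symm hne]
            · rw [if_neg h3, if_neg h3]
              simp [List.count_cons, h2]
              omega
        · rw [if_neg h2, ih m c]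
          simp only [List.foldl_cons, min_eq_left (le_of_not_gt h1)]
          refine Prod.ext ?_ ?_
          · rfl
          · by_cases h3 : T.foldl min m < m
            · rw [if_pos h3, if_pos h3]
              have hne : ¬ (T.foldl min m = x) := by omega
              simp [List.count_cons, hne, Ne.symm hne]
            · rw [if_neg h3, if_neg h3]
              have hne : ¬ (m = x) := fun h => h2 h.symm
              simp [List.count_cons, h2, hne]

-- every materialized diff is strictly below len(firstString); needs: dict values built
-- from enumerate(secondString) are nonnegative
theorem pv_dict_values_nonneg (s : List Char) :
    ∀ (i : Int) (d : PySem.Dict Char Int), 0 ≤ i → (∀ k v, d.get? k = some v → 0 ≤ v) →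
    ∀ k v, ((PySem.List.enumerate s i).foldl (fun d p => d.insert p.2 p.1) d).get? k = some v → 0 ≤ v := by
  induction s with
  | nil => intro i d _ hd k v h; exact hd k v (by simpa [PySem.List.enumerate_nil] using h)
  | cons a s ih =>
    intro i d hi hd k v h
    rw [PySem.List.enumerate_cons] at h
    refine ih (i + 1) (d.insert a i) (by omega) ?_ k v (by simpa using h)
    intro k' v' h'
    rw [PySem.Dict.get?_insert] at h'
    split_ifs at h' with hk
    · cases h'; exact hi
    · exact hd k' v' h'

theorem pv_diffs_lt (firstString : String) (pos : PySem.Dict Char Int)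
    (hpos : ∀ k v, pos.get? k = some v → 0 ≤ v) :
    ∀ y ∈ (PySem.List.enumerate firstString.toList).filterMap
      (fun p => if pos.contains p.2 then some (p.1 - pos.getD p.2 0) else none),
      y < (firstString.toList.length : Int) := by
  intro y hy
  rw [List.mem_filterMap] at hy
  obtain ⟨p, hp, hf⟩ := hy
  by_cases hc : pos.contains p.2 = true
  · rw [if_pos hc] at hf
    obtain ⟨k, hk, hpk⟩ := (PySem.List.mem_enumerate_iff ..).1 hp
    have hsome : (pos.get? p.2).isSome := by
      rw [← PySem.Dict.contains_eq_isSome_get?]; exact hc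
    obtain ⟨v, hv⟩ := Option.isSome_iff_exists.1 hsome
    have hv0 : 0 ≤ v := hpos _ _ hv
    have hgd : pos.getD p.2 0 = v := PySem.Dict.getD_of_get?_eq_some _ _ hv
    have hp1 : p.1 = (k : Int) := by rw [hpk]; simp
    have hy := Option.some.inj hf
    omega
  · rw [if_neg hc] at hf; exact absurd hf (by simp)

-- ===== VERDICT (by name: the statement is the Claim_ definition above) =====
theorem countQuadruples_spec : Claim_equal_countQuadruples := by
  intro firstString secondString _
  unfold Spec_countQuadruples countQuadruples countQuadruples_alt
  simp only []
  set pos : PySem.Dict Char Int :=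
    (PySem.List.enumerate secondString.toList).foldl
      (fun d p => d.insert p.2 p.1) PySem.Dict.empty with hposdef
  have hpos : ∀ k v, pos.get? k = some v → 0 ≤ v := by
    intro k v h
    exact pv_dict_values_nonneg secondString.toList 0 PySem.Dict.empty le_rfl
      (by intro k v h; simp [PySem.Dict.get?_empty] at h) k v (hposdef ▸ h)
  rw [pv_loop_eq pos]
  set D : List Int := (PySem.List.enumerate firstString.toList).filterMap
      (fun p => if pos.contains p.2 then some (p.1 - pos.getD p.2 0) else none) with hDdef
  have hlt : ∀ y ∈ D, y < (firstString.toList.length : Int) :=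
    pv_diffs_lt firstString pos hpos
  cases hD : D with
  | nil =>
    simp [PySem.Str.len_eq]
    cases PySem.List.min? ([] : List Int) (fun x => x) <;> rfl
  | cons x T =>
    have hx : x < (firstString.toList.length : Int) := hlt x (hD ▸ List.mem_cons_self ..)
    have hT : ∀ y ∈ T, y < (firstString.toList.length : Int) :=
      fun y hy => hlt y (hD ▸ List.mem_cons_of_mem _ hy)
    rw [PySem.List.min?_id_cons]
    have hmin : min (firstString.toList.length : Int) x = x := min_eq_right (le_of_lt hx)
    have hfl : T.foldl min x < (firstString.toList.length : Int) := pv_foldl_min_lt T x _ hx hT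
    simp only [List.foldl_cons, PySem.Str.len_eq, hmin, if_pos hfl]
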